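-- pv_equiv track=rewrite | github.com/ChunJiang-Shi/PyQuda | pyquda/utils/phase.py | getMomList
-- ===== SOURCE A (Python) =====
-- def isqrt(n):
--     if n > 0:
--         x = 1 << (n.bit_length() + 1 >> 1)
--         while True:
--             y = (x + n // x) >> 1
--             if y >= x:
--                 return x
--             x = y
--     elif n == 0:
--         return 0
--     else:
--         raise ValueError("Integer square root not defined for negative numbers.")
--
-- def getMomList(mom2_max, mom2_min=0):
--     mom_list = []
--     radius = isqrt(mom2_max)
--     for npz in range(-radius, radius + 1):
--         for npy in range(-radius, radius + 1):
--             for npx in range(-radius, radius + 1):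
--                 np2 = npx**2 + npy**2 + npz**2
--                 if np2 <= mom2_max and np2 >= mom2_min:
--                     mom_list.append((npx, npy, npz))
--     return mom_list
-- ===== SOURCE B (Python) =====
-- def _isqrt(n):
--     # floor square root by binary search on [0, n+1); n >= 0
--     lo, hi = 0, n + 1
--     while hi - lo > 1:
--         mid = (lo + hi) // 2
--         if mid * mid <= n:
--             lo = mid
--         else:
--             hi = mid
--     return lo
--
-- def getMomList(mom2_max, mom2_min=0):
--     # Per (npz, npy) column, emit the valid npx interval(s) directly instead of
--     # scanning the full cube and testing every point.
--     if mom2_max < 0: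
--         return []
--     mom_list = []
--     r = _isqrt(mom2_max)
--     for npz in range(-r, r + 1):
--         rem_z = mom2_max - npz * npz
--         ry = _isqrt(rem_z)
--         for npy in range(-ry, ry + 1):
--             rem = rem_z - npy * npy
--             rx = _isqrt(rem)
--             lo2 = mom2_min - npz * npz - npy * npy
--             if lo2 <= 0:
--                 for npx in range(-rx, rx + 1):
--                     mom_list.append((npx, npy, npz))
--             else:
--                 s = _isqrt(lo2 - 1) + 1
--                 for npx in range(-rx, -s + 1):
--                     mom_list.append((npx, npy, npz))
--                 for npx in range(s, rx + 1):
--                     mom_list.append((npx, npy, npz))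
--     return mom_list
-- ===== Notes on version B (the rewrite author's own statement) =====
-- stated objective: faster
-- what changed: Instead of scanning the full (2r+1)^3 cube and testing every lattice point, B computes for each (npz,npy) column the exact valid npx interval(s) via integer square roots (binary-search isqrt), emitting points directly; npy is also restricted to its valid range per npz.
-- crash fix: For mom2_max < 0, A's isqrt raises ValueError while B returns [] (no momenta have negative squared norm). — e.g. on getMomList(-1, 0): A raises ValueError, B returns []
import Mathlib
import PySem

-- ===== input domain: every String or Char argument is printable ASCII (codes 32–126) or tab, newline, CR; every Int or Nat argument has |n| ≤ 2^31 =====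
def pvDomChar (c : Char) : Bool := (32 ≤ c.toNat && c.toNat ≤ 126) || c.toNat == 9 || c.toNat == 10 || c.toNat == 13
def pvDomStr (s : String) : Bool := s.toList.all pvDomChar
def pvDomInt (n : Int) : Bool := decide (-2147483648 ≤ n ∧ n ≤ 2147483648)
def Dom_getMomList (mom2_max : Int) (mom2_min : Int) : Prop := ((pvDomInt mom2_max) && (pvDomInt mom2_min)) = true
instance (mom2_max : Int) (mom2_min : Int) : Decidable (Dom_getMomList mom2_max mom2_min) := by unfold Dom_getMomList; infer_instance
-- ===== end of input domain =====

-- B replaces A's full-cube scan by emitting, for each (npz, npy), the valid npx interval(s)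
-- computed with integer square roots (objective: faster).

-- ===== PORT A =====
-- Newton loop of A's isqrt: y = (x + n // x) >> 1 until y >= x (n, x stay positive at every call).
def pvIsqrtLoopA (n x : Nat) : Nat :=
  let y := (x + n / x) / 2
  if _h : y ≥ x then x else pvIsqrtLoopA n y
termination_by x
decreasing_by omega

-- A's isqrt; for n > 0, Python's n.bit_length() is PySem.Int.bitLength n, 1 << k is 2 ^ k,
-- and (bit_length + 1) >> 1 is (bitLength + 1) / 2 on Nat.
def pvIsqrtA (n : Int) : Int :=
  if n > 0 then
    ((pvIsqrtLoopA n.toNat (2 ^ ((PySem.Int.bitLength n + 1) / 2)) : Nat) : Int)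
  else if n = 0 then 0
  else 0  -- Python raises ValueError here; excluded by Pre_getMomList

def getMomList (mom2_max : Int) (mom2_min : Int) : List (List Int) :=
  let radius := pvIsqrtA mom2_max
  (PySem.List.pyRange (-radius) (radius + 1)).foldl (fun acc npz =>
    (PySem.List.pyRange (-radius) (radius + 1)).foldl (fun acc npy =>
      (PySem.List.pyRange (-radius) (radius + 1)).foldl (fun acc npx =>
        let np2 := npx ^ 2 + npy ^ 2 + npz ^ 2
        if np2 ≤ mom2_max ∧ np2 ≥ mom2_min then acc ++ [[npx, npy, npz]] else acc) acc) acc) []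

-- ===== PORT B =====
-- B's isqrt (Source B's _isqrt): binary search keeping lo*lo ≤ n < hi*hi.
def pvIsqrtLoopB (n lo hi : Int) : Int :=
  if _h : hi - lo > 1 then
    let mid := PySem.Int.floordiv (lo + hi) 2
    if mid * mid ≤ n then pvIsqrtLoopB n mid hi else pvIsqrtLoopB n lo mid
  else lo
termination_by (hi - lo).toNat
decreasing_by
  · have h1 := (PySem.Int.le_floordiv_iff_mul_le (a := lo + hi) (b := 2) (q := lo + 1)
      (by norm_num)).mpr (by omega)
    omega
  · have h2 := (PySem.Int.floordiv_lt_iff_lt_mul (a := lo + hi) (b := 2) (q := hi)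
      (by norm_num)).mpr (by omega)
    omega

def pvIsqrtB (n : Int) : Int := pvIsqrtLoopB n 0 (n + 1)

def getMomList_alt (mom2_max : Int) (mom2_min : Int) : List (List Int) :=
  if mom2_max < 0 then []
  else
    let r := pvIsqrtB mom2_max
    (PySem.List.pyRange (-r) (r + 1)).foldl (fun acc npz =>
      let remz := mom2_max - npz * npz
      let ry := pvIsqrtB remz
      (PySem.List.pyRange (-ry) (ry + 1)).foldl (fun acc npy =>
        let rem := remz - npy * npy
        let rx := pvIsqrtB rem
        let lo2 := mom2_min - npz * npz - npy * npy
        if lo2 ≤ 0 then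
          (PySem.List.pyRange (-rx) (rx + 1)).foldl (fun acc npx => acc ++ [[npx, npy, npz]]) acc
        else
          let s := pvIsqrtB (lo2 - 1) + 1
          (PySem.List.pyRange s (rx + 1)).foldl (fun acc npx => acc ++ [[npx, npy, npz]])
            ((PySem.List.pyRange (-rx) (-s + 1)).foldl (fun acc npx => acc ++ [[npx, npy, npz]]) acc)
      ) acc) []

-- ===== PRECONDITION & SPEC =====
-- Pre_ excludes exactly mom2_max < 0, where A's isqrt raises ValueError.
def Pre_getMomList (mom2_max : Int) (mom2_min : Int) : Prop := 0 ≤ mom2_max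
instance (mom2_max : Int) (mom2_min : Int) : Decidable (Pre_getMomList mom2_max mom2_min) := by
  unfold Pre_getMomList; infer_instance
def pvWitness_getMomList : Int × Int := (5, 2)

-- For mom2_max < 0, A's isqrt raises ValueError while B returns [] (no momenta have negative squared norm).
def Raises_getMomList (mom2_max : Int) (mom2_min : Int) : Prop := mom2_max < 0
instance (mom2_max : Int) (mom2_min : Int) : Decidable (Raises_getMomList mom2_max mom2_min) := by
  unfold Raises_getMomList; infer_instance
def pvRaiseWitness_getMomList : Int × Int := (-1, 0)
def pvRaiseWitnessOut_getMomList : List (List Int) := []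

def Spec_getMomList (mom2_max : Int) (mom2_min : Int) (out : List (List Int)) : Prop := out = getMomList_alt mom2_max mom2_min
instance (mom2_max : Int) (mom2_min : Int) (out : List (List Int)) : Decidable (Spec_getMomList mom2_max mom2_min out) := by unfold Spec_getMomList; infer_instance

-- ===== CLAIM (what is proved, stated in full; the proofs are below) =====
def Claim_equal_getMomList : Prop := ∀ (mom2_max : Int) (mom2_min : Int), Dom_getMomList mom2_max mom2_min → Pre_getMomList mom2_max mom2_min → Spec_getMomList mom2_max mom2_min (getMomList mom2_max mom2_min)
def Claim_raises_getMomList : Prop := (∀ (mom2_max : Int) (mom2_min : Int), Dom_getMomList mom2_max mom2_min → Raises_getMomList mom2_max mom2_min → ¬ Pre_getMomList mom2_max mom2_min) ∧ (Dom_getMomList (pvRaiseWitness_getMomList.1) (pvRaiseWitness_getMomList.2) ∧ Raises_getMomList (pvRaiseWitness_getMomList.1) (pvRaiseWitness_getMomList.2) ∧ getMomList_alt (pvRaiseWitness_getMomList.1) (pvRaiseWitness_getMomList.2) = pvRaiseWitnessOut_getMomList)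

-- ===== LEMMAS AND PROOFS =====

theorem pvLoopA_eq_iter (n : Nat) : ∀ x, pvIsqrtLoopA n x = Nat.sqrt.iter n x := by
  intro x
  induction x using Nat.strong_induction_on with
  | _ x ih =>
    rw [pvIsqrtLoopA, Nat.sqrt.iter.eq_def]
    by_cases h : (x + n / x) / 2 ≥ x
    · rw [dif_pos h, dif_neg (by omega : ¬ (x + n / x) / 2 < x)]
    · rw [dif_neg h, dif_pos (by omega : (x + n / x) / 2 < x)]
      exact ih _ (by omega)

theorem pvSqrt_unique (n a b : Int) (ha : 0 ≤ a) (hb : 0 ≤ b)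
    (ha1 : a * a ≤ n) (ha2 : n < (a + 1) * (a + 1))
    (hb1 : b * b ≤ n) (hb2 : n < (b + 1) * (b + 1)) : a = b := by
  rcases lt_trichotomy a b with h | h | h
  · exfalso; nlinarith
  · exact h
  · exfalso; nlinarith

theorem pvSq_le_iff (x R rx : Int) (h0 : 0 ≤ rx) (h1 : rx * rx ≤ R) (h2 : R < (rx + 1) * (rx + 1)) :
    x * x ≤ R ↔ (-rx ≤ x ∧ x ≤ rx) := by
  constructor
  · intro h
    constructor
    · by_contra hc; push Not at hc; nlinarith
    · by_contra hc; push Not at hc; nlinarith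
  · rintro ⟨hl, hr⟩
    nlinarith [mul_nonneg (by linarith : (0:Int) ≤ rx - x) (by linarith : (0:Int) ≤ rx + x)]

theorem pvLe_sq_iff (x L s : Int) (hs : 1 ≤ s) (h1 : (s - 1) * (s - 1) ≤ L - 1) (h2 : L - 1 < s * s) :
    L ≤ x * x ↔ (x ≤ -s ∨ s ≤ x) := by
  constructor
  · intro h
    by_contra hc; push Not at hc
    obtain ⟨hc1, hc2⟩ := hc
    have hb1 : -(s-1) ≤ x := by omega
    have hb2 : x ≤ s - 1 := by omega
    nlinarith [mul_nonneg (by linarith : (0:Int) ≤ (s-1) - x) (by linarith : (0:Int) ≤ (s-1) + x)]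
  · rintro (h | h)
    · nlinarith [mul_nonneg (by linarith : (0:Int) ≤ -x - s) (by linarith : (0:Int) ≤ -x + s)]
    · nlinarith [mul_nonneg (by linarith : (0:Int) ≤ x - s) (by linarith : (0:Int) ≤ x + s)]

theorem pvFilter_between (a b c d : Int) (hdb : d < b) :
    (PySem.List.pyRange a b).filter (fun x => decide (c ≤ x ∧ x ≤ d))
      = PySem.List.pyRange (max a c) (d + 1) := by
  suffices H : ∀ (k : Nat) (a : Int), (b - a).toNat = k →
      (PySem.List.pyRange a b).filter (fun x => decide (c ≤ x ∧ x ≤ d))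
        = PySem.List.pyRange (max a c) (d + 1) from H _ a rfl
  intro k
  induction k using Nat.strong_induction_on with
  | _ k ih =>
    intro a hk
    by_cases hab : a < b
    · rw [PySem.List.pyRange_one_cons hab, List.filter_cons]
      by_cases hpa : c ≤ a ∧ a ≤ d
      · rw [if_pos (by simpa using hpa)]
        rw [ih (b - (a+1)).toNat (by omega) (a+1) rfl]
        rw [max_eq_left (by omega : c ≤ a + 1), max_eq_left (by omega : c ≤ a)]
        exact (PySem.List.pyRange_one_cons (by omega : a < d + 1)).symm
      · rw [if_neg (by simpa using hpa)]
        rw [ih (b - (a+1)).toNat (by omega) (a+1) rfl]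
        by_cases hac : a < c
        · rw [max_eq_right (by omega : a + 1 ≤ c), max_eq_right (by omega : a ≤ c)]
        · have hda : d < a := by omega
          rw [PySem.List.pyRange_one_eq_nil (by omega : d + 1 ≤ max (a+1) c),
              PySem.List.pyRange_one_eq_nil (by omega : d + 1 ≤ max a c)]
    · rw [PySem.List.pyRange_one_eq_nil (by omega : b ≤ a)]
      exact (PySem.List.pyRange_one_eq_nil (by omega : d + 1 ≤ max a c)).symm

theorem pvIsqrtA_bracket (n : Int) (hn : 0 ≤ n) :
    0 ≤ pvIsqrtA n ∧ pvIsqrtA n * pvIsqrtA n ≤ n ∧ n < (pvIsqrtA n + 1) * (pvIsqrtA n + 1) := by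
  unfold pvIsqrtA
  by_cases hpos : n > 0
  · rw [if_pos hpos]
    set g := 2 ^ ((PySem.Int.bitLength n + 1) / 2) with hg
    have hbl := PySem.Int.lt_two_pow_bitLength n
    have hgg : n.toNat < g * g := by
      have h2 : 2 ^ PySem.Int.bitLength n ≤ g * g := by
        rw [hg, ← pow_add]
        exact Nat.pow_le_pow_right (by norm_num) (by omega)
      have : n.toNat = n.natAbs := by omega
      omega
    have hguess : n.toNat < (g + 1) * (g + 1) := by nlinarith
    rw [pvLoopA_eq_iter]
    have h1 := Nat.sqrt.iter_sq_le n.toNat g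
    have h2 := Nat.sqrt.lt_iter_succ_sq n.toNat g hguess
    refine ⟨by positivity, ?_, ?_⟩
    · have h1' : ((Nat.sqrt.iter n.toNat g * Nat.sqrt.iter n.toNat g : Nat) : Int) ≤ (n.toNat : Int) :=
        Int.ofNat_le.mpr h1
      rw [Int.toNat_of_nonneg hn] at h1'
      exact_mod_cast h1'
    · have h2' : (n.toNat : Int) < (((Nat.sqrt.iter n.toNat g + 1) * (Nat.sqrt.iter n.toNat g + 1) : Nat) : Int) :=
        Int.ofNat_lt.mpr h2
      rw [Int.toNat_of_nonneg hn] at h2'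
      exact_mod_cast h2'
  · rw [if_neg hpos, if_pos (by omega : n = 0)]
    norm_num
    omega

theorem pvLoopB_bracket (n : Int) : ∀ (k : Nat) (lo hi : Int), (hi - lo).toNat = k →
    0 ≤ lo → lo * lo ≤ n → n < hi * hi → lo < hi →
    0 ≤ pvIsqrtLoopB n lo hi ∧ pvIsqrtLoopB n lo hi * pvIsqrtLoopB n lo hi ≤ n ∧
      n < (pvIsqrtLoopB n lo hi + 1) * (pvIsqrtLoopB n lo hi + 1) := by
  intro k
  induction k using Nat.strong_induction_on with
  | _ k ih =>
    intro lo hi hk h0 h1 h2 h3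
    rw [pvIsqrtLoopB]
    by_cases hgap : hi - lo > 1
    · rw [dif_pos hgap]
      have hm1 := (PySem.Int.le_floordiv_iff_mul_le (a := lo + hi) (b := 2) (q := lo + 1)
        (by norm_num)).mpr (by omega)
      have hm2 := (PySem.Int.floordiv_lt_iff_lt_mul (a := lo + hi) (b := 2) (q := hi)
        (by norm_num)).mpr (by omega)
      set mid := PySem.Int.floordiv (lo + hi) 2 with hmid
      by_cases hsq : mid * mid ≤ n
      · rw [if_pos hsq]
        exact ih (hi - mid).toNat (by omega) mid hi rfl (by omega) hsq h2 (by omega)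
      · rw [if_neg hsq]
        exact ih (mid - lo).toNat (by omega) lo mid rfl h0 h1 (by omega) (by omega)
    · rw [dif_neg hgap]
      have : hi = lo + 1 := by omega
      exact ⟨h0, h1, by rw [← this]; exact h2⟩

theorem pvIsqrtB_bracket (n : Int) (hn : 0 ≤ n) :
    0 ≤ pvIsqrtB n ∧ pvIsqrtB n * pvIsqrtB n ≤ n ∧ n < (pvIsqrtB n + 1) * (pvIsqrtB n + 1) := by
  unfold pvIsqrtB
  exact pvLoopB_bracket n _ 0 (n + 1) rfl le_rfl (by simpa) (by nlinarith) (by omega)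

theorem pvIsqrtAB (n : Int) (hn : 0 ≤ n) : pvIsqrtA n = pvIsqrtB n := by
  obtain ⟨a0, a1, a2⟩ := pvIsqrtA_bracket n hn
  obtain ⟨b0, b1, b2⟩ := pvIsqrtB_bracket n hn
  exact pvSqrt_unique n _ _ a0 b0 a1 a2 b1 b2

theorem pvInner_eq (M m z y r : Int) (hr0 : 0 ≤ r) (hr1 : r * r ≤ M) (hr2 : M < (r + 1) * (r + 1))
    (hc : z * z + y * y ≤ M) :
    (PySem.List.pyRange (-r) (r + 1)).filter
        (fun x => decide (x ^ 2 + y ^ 2 + z ^ 2 ≤ M ∧ x ^ 2 + y ^ 2 + z ^ 2 ≥ m))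
      = (if m - z * z - y * y ≤ 0 then
          PySem.List.pyRange (-(pvIsqrtB (M - z * z - y * y))) (pvIsqrtB (M - z * z - y * y) + 1)
        else
          PySem.List.pyRange (-(pvIsqrtB (M - z * z - y * y))) (-(pvIsqrtB (m - z * z - y * y - 1) + 1) + 1)
            ++ PySem.List.pyRange (pvIsqrtB (m - z * z - y * y - 1) + 1) (pvIsqrtB (M - z * z - y * y) + 1)) := by
  have hrem : 0 ≤ M - z * z - y * y := by omega
  obtain ⟨hx0, hx1, hx2⟩ := pvIsqrtB_bracket (M - z * z - y * y) hrem
  set rx := pvIsqrtB (M - z * z - y * y) with hrx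
  have hxr : rx ≤ r := by nlinarith
  have hsq : ∀ x : Int, (x * x ≤ M - z * z - y * y) ↔ (-rx ≤ x ∧ x ≤ rx) :=
    fun x => pvSq_le_iff x _ rx hx0 hx1 hx2
  by_cases hlo : m - z * z - y * y ≤ 0
  · rw [if_pos hlo]
    have hpred : ∀ x : Int,
        (x ^ 2 + y ^ 2 + z ^ 2 ≤ M ∧ x ^ 2 + y ^ 2 + z ^ 2 ≥ m) ↔ (-rx ≤ x ∧ x ≤ rx) := by
      intro x
      have hxx : 0 ≤ x * x := mul_self_nonneg x
      have := hsq x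
      constructor
      · rintro ⟨h1, _⟩; exact (hsq x).mp (by nlinarith)
      · rintro h
        have := (hsq x).mpr h
        constructor <;> nlinarith
    have : (fun x : Int => decide (x ^ 2 + y ^ 2 + z ^ 2 ≤ M ∧ x ^ 2 + y ^ 2 + z ^ 2 ≥ m))
        = (fun x : Int => decide (-rx ≤ x ∧ x ≤ rx)) :=
      funext fun x => decide_eq_decide.mpr (hpred x)
    rw [this, pvFilter_between (-r) (r+1) (-rx) rx (by omega), max_eq_right (by omega : -r ≤ -rx)]
  · rw [if_neg hlo]
    obtain ⟨hs0, hs1, hs2⟩ := pvIsqrtB_bracket (m - z * z - y * y - 1) (by omega)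
    have hle : ∀ x : Int, (m - z * z - y * y ≤ x * x) ↔
        (x ≤ -(pvIsqrtB (m - z * z - y * y - 1) + 1) ∨ pvIsqrtB (m - z * z - y * y - 1) + 1 ≤ x) := by
      intro x
      exact pvLe_sq_iff x (m - z * z - y * y) (pvIsqrtB (m - z * z - y * y - 1) + 1) (by omega)
        (by have h := hs1; nlinarith) (by nlinarith)
    set sb := pvIsqrtB (m - z * z - y * y - 1) with hsb
    have hsb0 : 0 ≤ sb := hs0
    have hpred : ∀ x : Int,
        (x ^ 2 + y ^ 2 + z ^ 2 ≤ M ∧ x ^ 2 + y ^ 2 + z ^ 2 ≥ m) ↔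
          ((-rx ≤ x ∧ x ≤ -(sb + 1)) ∨ (sb + 1 ≤ x ∧ x ≤ rx)) := by
      intro x
      have e1 : x ^ 2 + y ^ 2 + z ^ 2 ≤ M ↔ (-rx ≤ x ∧ x ≤ rx) := by
        rw [← hsq x]; constructor <;> intro h <;> nlinarith
      have e2 : x ^ 2 + y ^ 2 + z ^ 2 ≥ m ↔ (x ≤ -(sb + 1) ∨ sb + 1 ≤ x) := by
        rw [← hle x]; constructor <;> intro h <;> nlinarith
      rw [e1, e2]
      omega
    have hfe : (fun x : Int => decide (x ^ 2 + y ^ 2 + z ^ 2 ≤ M ∧ x ^ 2 + y ^ 2 + z ^ 2 ≥ m))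
        = (fun x : Int => decide ((-rx ≤ x ∧ x ≤ -(sb + 1)) ∨ (sb + 1 ≤ x ∧ x ≤ rx))) :=
      funext fun x => decide_eq_decide.mpr (hpred x)
    rw [hfe]
    by_cases hsr : sb + 1 ≤ r + 1
    · rw [PySem.List.pyRange_one_append (-r) (sb + 1) (r + 1) (by omega) (by omega),
          List.filter_append]
      have hL : (PySem.List.pyRange (-r) (sb + 1)).filter
            (fun x : Int => decide ((-rx ≤ x ∧ x ≤ -(sb + 1)) ∨ (sb + 1 ≤ x ∧ x ≤ rx)))
          = (PySem.List.pyRange (-r) (sb + 1)).filter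
            (fun x : Int => decide (-rx ≤ x ∧ x ≤ -(sb + 1))) := by
        apply List.filter_congr
        intro x hx
        have hxm := PySem.List.mem_pyRange_one.mp hx
        exact decide_eq_decide.mpr (by omega)
      have hR : (PySem.List.pyRange (sb + 1) (r + 1)).filter
            (fun x : Int => decide ((-rx ≤ x ∧ x ≤ -(sb + 1)) ∨ (sb + 1 ≤ x ∧ x ≤ rx)))
          = (PySem.List.pyRange (sb + 1) (r + 1)).filter
            (fun x : Int => decide (sb + 1 ≤ x ∧ x ≤ rx)) := by
        apply List.filter_congr
        intro x hx
        have hxm := PySem.List.mem_pyRange_one.mp hx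
        exact decide_eq_decide.mpr (by omega)
      rw [hL, hR, pvFilter_between (-r) (sb + 1) (-rx) (-(sb + 1)) (by omega),
          pvFilter_between (sb + 1) (r + 1) (sb + 1) rx (by omega),
          max_eq_right (by omega : -r ≤ -rx), max_self]
    · have hnil : (PySem.List.pyRange (-r) (r + 1)).filter
            (fun x : Int => decide ((-rx ≤ x ∧ x ≤ -(sb + 1)) ∨ (sb + 1 ≤ x ∧ x ≤ rx))) = [] := by
        rw [List.filter_eq_nil_iff]
        intro x hx
        have hxm := PySem.List.mem_pyRange_one.mp hx
        simp only [decide_eq_true_eq]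
        omega
      rw [hnil, PySem.List.pyRange_one_eq_nil (by omega : -(sb + 1) + 1 ≤ -rx),
          PySem.List.pyRange_one_eq_nil (by omega : rx + 1 ≤ sb + 1), List.append_nil]

theorem pvFoldl_append_ite_prop {α β : Type} (P : α → Prop) [DecidablePred P] (f : α → β)
    (l : List α) (acc : List β) :
    l.foldl (fun acc x => if P x then acc ++ [f x] else acc) acc
      = acc ++ (l.filter (fun x => decide (P x))).map f := by
  rw [← PySem.List.foldl_append_if (fun x => decide (P x)) f l acc]
  exact PySem.List.foldl_congr_mem l _ _ acc (by intro a x _; by_cases h : P x <;> simp [h])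

theorem pvAppend_ite {α : Type} (c : Prop) [Decidable c] (a u v : List α) :
    (if c then a ++ u else a ++ v) = a ++ (if c then u else v) := by
  split <;> rfl

theorem pvFlatMap_restrict {β : Type} (a b c d : Int) (hac : a ≤ c) (hcd : c ≤ d) (hdb : d ≤ b)
    (f : Int → List β) (h : ∀ y, a ≤ y → y < b → (y < c ∨ d ≤ y) → f y = []) :
    (PySem.List.pyRange a b).flatMap f = (PySem.List.pyRange c d).flatMap f := by
  rw [PySem.List.pyRange_one_append a c b hac (by omega),
      PySem.List.pyRange_one_append c d b hcd hdb, List.flatMap_append, List.flatMap_append]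
  have hn1 : (PySem.List.pyRange a c).flatMap f = [] :=
    List.flatMap_eq_nil_iff.mpr (fun y hy => by
      have hm := PySem.List.mem_pyRange_one.mp hy
      exact h y hm.1 (by omega) (Or.inl hm.2))
  have hn2 : (PySem.List.pyRange d b).flatMap f = [] :=
    List.flatMap_eq_nil_iff.mpr (fun y hy => by
      have hm := PySem.List.mem_pyRange_one.mp hy
      exact h y (by omega) hm.2 (Or.inr hm.1))
  rw [hn1, hn2, List.nil_append, List.append_nil]

theorem pvMain (M m : Int) (hpre : 0 ≤ M) : getMomList M m = getMomList_alt M m := by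
  obtain ⟨hr0, hr1, hr2⟩ := pvIsqrtB_bracket M hpre
  have hAB := pvIsqrtAB M hpre
  unfold getMomList getMomList_alt
  rw [if_neg (by omega : ¬ M < 0)]
  simp only [pvFoldl_append_ite_prop, PySem.List.foldl_append_singleton_eq_map,
    List.append_assoc, pvAppend_ite, PySem.List.foldl_append_eq_flatMap, List.nil_append, hAB]
  apply List.flatMap_congr
  intro z hz
  have hzm := PySem.List.mem_pyRange_one.mp hz
  have hz2 : z * z ≤ M := by
    nlinarith [mul_nonneg (by linarith [hzm.1] : (0:Int) ≤ pvIsqrtB M + z)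
      (by linarith [hzm.2] : (0:Int) ≤ pvIsqrtB M - z)]
  obtain ⟨hy0, hy1, hy2⟩ := pvIsqrtB_bracket (M - z * z) (by omega)
  have hyr : pvIsqrtB (M - z * z) ≤ pvIsqrtB M := by nlinarith
  rw [pvFlatMap_restrict (-(pvIsqrtB M)) (pvIsqrtB M + 1) (-(pvIsqrtB (M - z * z)))
      (pvIsqrtB (M - z * z) + 1) (by omega) (by omega) (by omega) _ ?_]
  · apply List.flatMap_congr
    intro y hy
    have hym := PySem.List.mem_pyRange_one.mp hy
    have hcy : z * z + y * y ≤ M := by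
      nlinarith [mul_nonneg (by linarith [hym.1] : (0:Int) ≤ pvIsqrtB (M - z * z) + y)
        (by linarith [hym.2] : (0:Int) ≤ pvIsqrtB (M - z * z) - y)]
    rw [pvInner_eq M m z y (pvIsqrtB M) hr0 hr1 hr2 hcy,
      apply_ite (List.map (fun x => ([x, y, z] : List Int))), List.map_append]
  · intro y hylo hyhi hyout
    have hyy : (pvIsqrtB (M - z * z) + 1) * (pvIsqrtB (M - z * z) + 1) ≤ y * y := by
      rcases hyout with h | h
      · nlinarith [mul_nonneg (by linarith : (0:Int) ≤ -y - (pvIsqrtB (M - z * z) + 1))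
          (by linarith [hy0] : (0:Int) ≤ -y + (pvIsqrtB (M - z * z) + 1))]
      · nlinarith [mul_nonneg (by linarith : (0:Int) ≤ y - (pvIsqrtB (M - z * z) + 1))
          (by linarith [hy0] : (0:Int) ≤ y + (pvIsqrtB (M - z * z) + 1))]
    rw [List.filter_eq_nil_iff.mpr ?_, List.map_nil]
    intro x _
    simp only [decide_eq_true_eq]
    rintro ⟨h1, -⟩
    nlinarith [sq_nonneg x]

-- ===== VERDICT (by name: the statement is the Claim_ definition above) =====
theorem getMomList_spec : Claim_equal_getMomList := by
  intro mom2_max mom2_min _ hpre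
  exact pvMain mom2_max mom2_min hpre

theorem getMomList_raises : Claim_raises_getMomList := by
  unfold Claim_raises_getMomList
  refine ⟨?_, by decide⟩
  intro mom2_max mom2_min _ h hP
  unfold Pre_getMomList at hP
  unfold Raises_getMomList at h
  omega

-- self-check: both claims above are the ones proved
theorem pvClaims_ok : Claim_equal_getMomList ∧ Claim_raises_getMomList :=
  ⟨getMomList_spec, getMomList_raises⟩
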